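-- pv_equiv track=rewrite | github.com/HirMtsd/AtCoder | ABC413/abc413b.py | func
-- ===== SOURCE A (Python) =====
-- def func(n, s):
--     # 重複を除く集合の数を数えたいので、連結文字列setを準備する
--     cset = set()
--
--     # n*n回ループ処理
--     for i in range(n):
--         for j in range(n):
--             # i = jのときスキップ
--             if i == j:
--                 continue
--             # SiとSjを結合し、連結文字列setに追加
--             cset.add(s[i]+s[j])
--
--     # 連結文字列setの数を返す
--     return(len(cset))
-- ===== SOURCE B (Python) =====
-- def func(n, s):
--     # Group by value: only distinct strings matter, plus whether a value occurs twice.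
--     p = s[:max(n, 0)]
--     vals = list(dict.fromkeys(p))  # distinct values, first-occurrence order
--     res = set()
--     for a in vals:
--         for b in vals:
--             # a+b is reachable with i != j iff the values differ or a occurs twice
--             if a != b or p.count(a) > 1:
--                 res.add(a + b)
--     return len(res)
-- ===== Notes on version B (the rewrite author's own statement) =====
-- stated objective: alternative
-- what changed: B iterates over pairs of DISTINCT values of the prefix (deduplicated, with v+v added only when v occurs at least twice) instead of A's n*n index-pair loop; only the d distinct values are paired, with a multiplicity test deciding the v+v pair.
import Mathlib
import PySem

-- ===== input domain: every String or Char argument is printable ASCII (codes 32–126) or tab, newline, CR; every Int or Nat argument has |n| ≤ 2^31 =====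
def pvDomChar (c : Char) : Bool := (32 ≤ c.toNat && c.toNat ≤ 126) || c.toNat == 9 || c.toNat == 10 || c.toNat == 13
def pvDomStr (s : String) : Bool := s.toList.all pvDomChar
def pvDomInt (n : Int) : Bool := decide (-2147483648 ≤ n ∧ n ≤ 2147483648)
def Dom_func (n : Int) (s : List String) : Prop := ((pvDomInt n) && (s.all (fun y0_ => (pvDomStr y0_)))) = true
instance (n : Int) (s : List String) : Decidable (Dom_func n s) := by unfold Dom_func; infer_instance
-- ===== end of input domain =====

-- B iterates over pairs of distinct values of the prefix instead of all n*n index pairs,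
-- with a multiplicity test for the v+v pair; equivalence of the two counts is proved on n ≤ len(s).

-- ===== PORT A =====
-- cset = set(); for i in range(n): for j in range(n): if i == j: continue; cset.add(s[i]+s[j]); return len(cset)
def func (n : Int) (s : List String) : Int :=
  let cset : PySem.Set String :=
    (PySem.List.pyRange 0 n 1).foldl (fun cset i =>
      (PySem.List.pyRange 0 n 1).foldl (fun cset j =>
        if i == j then cset
        else PySem.Set.add cset (PySem.List.pyGetD s i "" ++ PySem.List.pyGetD s j ""))
        cset)
      PySem.Set.empty
  PySem.Set.len cset

-- ===== PORT B =====
def func_alt (n : Int) (s : List String) : Int :=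
  let p := PySem.List.slice s none (some (max n 0))
  let vals := PySem.List.dedup p
  let res : PySem.Set String :=
    vals.foldl (fun res a =>
      vals.foldl (fun res b =>
        if a ≠ b ∨ PySem.List.count p a > 1 then PySem.Set.add res (a ++ b) else res)
        res)
      PySem.Set.empty
  PySem.Set.len res

-- ===== PRECONDITION & SPEC =====
-- A indexes s[i] for every i < n, so it raises IndexError exactly when n > len(s).
def Pre_func (n : Int) (s : List String) : Prop := n ≤ (s.length : Int)
instance (n : Int) (s : List String) : Decidable (Pre_func n s) := by unfold Pre_func; infer_instance
def pvWitness_func : Int × List String := (3, ["ab", "a", "ab"])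

def Spec_func (n : Int) (s : List String) (out : Int) : Prop := out = func_alt n s
instance (n : Int) (s : List String) (out : Int) : Decidable (Spec_func n s out) := by unfold Spec_func; infer_instance

-- ===== CLAIM (what is proved, stated in full; the proofs are below) =====
def Claim_equal_func : Prop := ∀ (n : Int) (s : List String), Dom_func n s → Pre_func n s → Spec_func n s (func n s)

-- ===== LEMMAS AND PROOFS =====

-- Membership through a fold whose step adds elements described by C.
theorem pv_mem_foldl_of_step {α β : Type} (g : PySem.Set β → α → PySem.Set β)
    (C : α → β → Prop) (h : ∀ st y x, x ∈ g st y ↔ x ∈ st ∨ C y x) :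
    ∀ (l : List α) (st0 : PySem.Set β) (x : β),
      x ∈ l.foldl g st0 ↔ x ∈ st0 ∨ ∃ y ∈ l, C y x := by
  intro l
  induction l with
  | nil => simp
  | cons y ys ih =>
    intro st0 x
    simp only [List.foldl_cons, ih, h, List.mem_cons]
    constructor
    · rintro ((hx | hc) | ⟨z, hz, hcz⟩)
      · exact Or.inl hx
      · exact Or.inr ⟨y, Or.inl rfl, hc⟩
      · exact Or.inr ⟨z, Or.inr hz, hcz⟩
    · rintro (hx | ⟨z, (rfl | hz), hcz⟩)
      · exact Or.inl (Or.inl hx)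
      · exact Or.inl (Or.inr hcz)
      · exact Or.inr ⟨z, hz, hcz⟩

-- Nodup through a fold whose step preserves Nodup.
theorem pv_nodup_foldl_of_step {α β : Type} (g : PySem.Set β → α → PySem.Set β)
    (h : ∀ st y, List.Nodup st → List.Nodup (g st y)) :
    ∀ (l : List α) (st0 : PySem.Set β), List.Nodup st0 → List.Nodup (l.foldl g st0) := by
  intro l
  induction l with
  | nil => intro st0 h0; simpa using h0
  | cons y ys ih => intro st0 h0; exact ih _ (h st0 y h0)

-- 1 < count ↔ two distinct positions carry the value.
theorem pv_one_lt_count_iff {α : Type} [DecidableEq α] (p : List α) (a : α) :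
    1 < List.count a p ↔
      ∃ i j : Nat, ∃ (hij : i < j) (hj : j < p.length), p[i]'(Nat.lt_trans hij hj) = a ∧ p[j] = a := by
  induction p with
  | nil => simp
  | cons x xs ih =>
    by_cases hx : a = x
    · subst hx
      simp only [List.count_cons_self]
      constructor
      · intro h
        have hm : a ∈ xs := by
          have : 0 < List.count a xs := by omega
          exact List.count_pos_iff.mp this
        obtain ⟨j, hj, hja⟩ := List.mem_iff_getElem.mp hm
        exact ⟨0, j + 1, by omega, by simpa using hj, rfl, by simpa using hja⟩
      · rintro ⟨i, j, hij, hj, hi_a, hj_a⟩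
        match j, hj with
        | j + 1, hj =>
          have : a ∈ xs := List.mem_iff_getElem.mpr ⟨j, by simpa using hj, by simpa using hj_a⟩
          have := List.count_pos_iff.mpr this
          omega
    · have hcc : List.count a (x :: xs) = List.count a xs := by
        have hx' : ¬x = a := fun h => hx h.symm
        simp [hx']
      rw [hcc, ih]
      constructor
      · rintro ⟨i, j, hij, hj, hi_a, hj_a⟩
        exact ⟨i + 1, j + 1, by omega, by simpa using hj, by simpa using hi_a, by simpa using hj_a⟩
      · rintro ⟨i, j, hij, hj, hi_a, hj_a⟩
        match i, j, hij, hj with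
        | 0, _, _, _ => exact absurd hi_a.symm hx
        | i + 1, j + 1, hij, hj =>
          exact ⟨i, j, by omega, by simpa using hj, by simpa using hi_a, by simpa using hj_a⟩

-- Characterisation of A's set: x is some s[i]+s[j] with i ≠ j, both below n.
theorem pv_memA (n : Int) (s : List String) (x : String) :
    (x ∈ (PySem.List.pyRange 0 n 1).foldl (fun cset i =>
      (PySem.List.pyRange 0 n 1).foldl (fun cset j =>
        if i == j then cset
        else PySem.Set.add cset (PySem.List.pyGetD s i "" ++ PySem.List.pyGetD s j ""))
        cset) PySem.Set.empty) ↔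
    ∃ i j : Int, 0 ≤ i ∧ i < n ∧ 0 ≤ j ∧ j < n ∧ i ≠ j ∧
      x = PySem.List.pyGetD s i "" ++ PySem.List.pyGetD s j "" := by
  rw [pv_mem_foldl_of_step _
    (fun i x => ∃ j ∈ PySem.List.pyRange 0 n 1, i ≠ j ∧
      x = PySem.List.pyGetD s i "" ++ PySem.List.pyGetD s j "")
    (by
      intro st i x
      rw [pv_mem_foldl_of_step _
        (fun j x => i ≠ j ∧ x = PySem.List.pyGetD s i "" ++ PySem.List.pyGetD s j "")
        (by
          intro st j x
          by_cases hij : i = j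
          · subst hij
            simp
          · rw [if_neg (by simpa using hij), PySem.Set.mem_add]
            tauto)])]
  simp only [PySem.Set.empty, List.not_mem_nil, false_or, PySem.List.mem_pyRange_one]
  constructor
  · rintro ⟨i, ⟨h0i, hin⟩, j, ⟨h0j, hjn⟩, hne, hx⟩
    exact ⟨i, j, h0i, hin, h0j, hjn, hne, hx⟩
  · rintro ⟨i, j, h0i, hin, h0j, hjn, hne, hx⟩
    exact ⟨i, ⟨h0i, hin⟩, j, ⟨h0j, hjn⟩, hne, hx⟩

-- Characterisation of B's set.
theorem pv_memB (p : List String) (x : String) :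
    (x ∈ (PySem.List.dedup p).foldl (fun res a =>
      (PySem.List.dedup p).foldl (fun res b =>
        if a ≠ b ∨ PySem.List.count p a > 1 then PySem.Set.add res (a ++ b) else res)
        res) PySem.Set.empty) ↔
    ∃ a ∈ p, ∃ b ∈ p, (a ≠ b ∨ 1 < List.count a p) ∧ x = a ++ b := by
  rw [pv_mem_foldl_of_step _
    (fun a x => ∃ b ∈ PySem.List.dedup p, (a ≠ b ∨ PySem.List.count p a > 1) ∧ x = a ++ b)
    (by
      intro st a x
      rw [pv_mem_foldl_of_step _
        (fun b x => (a ≠ b ∨ PySem.List.count p a > 1) ∧ x = a ++ b)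
        (by
          intro st b x
          split_ifs with hc
          · rw [PySem.Set.mem_add]
            tauto
          · tauto)])]
  simp only [PySem.Set.empty, List.not_mem_nil, false_or, PySem.List.mem_dedup,
    PySem.List.count_eq, gt_iff_lt]

-- Nodup of both sets.
theorem pv_nodupA (n : Int) (s : List String) :
    List.Nodup ((PySem.List.pyRange 0 n 1).foldl (fun cset i =>
      (PySem.List.pyRange 0 n 1).foldl (fun cset j =>
        if i == j then cset
        else PySem.Set.add cset (PySem.List.pyGetD s i "" ++ PySem.List.pyGetD s j ""))
        cset) PySem.Set.empty) := by
  apply pv_nodup_foldl_of_step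
  · intro st i h
    apply pv_nodup_foldl_of_step _ _ _ _ h
    intro st j hst
    by_cases hij : i == j
    · simpa [hij] using hst
    · simpa [hij] using PySem.Set.nodup_add _ _ hst
  · simp [PySem.Set.empty]

theorem pv_nodupB (p : List String) :
    List.Nodup ((PySem.List.dedup p).foldl (fun res a =>
      (PySem.List.dedup p).foldl (fun res b =>
        if a ≠ b ∨ PySem.List.count p a > 1 then PySem.Set.add res (a ++ b) else res)
        res) PySem.Set.empty) := by
  apply pv_nodup_foldl_of_step
  · intro st a h
    apply pv_nodup_foldl_of_step _ _ _ _ h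
    intro st b hst
    split_ifs with hc
    · exact PySem.Set.nodup_add _ _ hst
    · exact hst
  · simp [PySem.Set.empty]

-- The two characterisations agree when p = s.take (max n 0).toNat and n ≤ len s.
theorem pv_cond_iff (n : Int) (s : List String) (hn : n ≤ (s.length : Int)) (x : String) :
    (∃ i j : Int, 0 ≤ i ∧ i < n ∧ 0 ≤ j ∧ j < n ∧ i ≠ j ∧
      x = PySem.List.pyGetD s i "" ++ PySem.List.pyGetD s j "") ↔
    (∃ a ∈ s.take (max n 0).toNat, ∃ b ∈ s.take (max n 0).toNat,
      (a ≠ b ∨ 1 < List.count a (s.take (max n 0).toNat)) ∧ x = a ++ b) := by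
  have hplen : (s.take (max n 0).toNat).length = (max n 0).toNat := by
    rw [List.length_take]
    omega
  have hget : ∀ (k : Nat) (hk : k < (s.take (max n 0).toNat).length),
      PySem.List.pyGetD s (k : Int) "" = (s.take (max n 0).toNat)[k] := by
    intro k hk
    rw [List.getElem_take, PySem.List.pyGetD_eq_getElem s "" (by omega) (by
      simp only [hplen] at hk
      omega)]
    simp
  constructor
  · rintro ⟨i, j, h0i, hin, h0j, hjn, hne, rfl⟩
    have hi : i.toNat < (s.take (max n 0).toNat).length := by omega
    have hj : j.toNat < (s.take (max n 0).toNat).length := by omega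
    have hi' : (i.toNat : Int) = i := by omega
    have hj' : (j.toNat : Int) = j := by omega
    refine ⟨(s.take (max n 0).toNat)[i.toNat], List.getElem_mem _,
            (s.take (max n 0).toNat)[j.toNat], List.getElem_mem _, ?_, by
      rw [← hget i.toNat hi, ← hget j.toNat hj, hi', hj']⟩
    by_cases hab : (s.take (max n 0).toNat)[i.toNat] = (s.take (max n 0).toNat)[j.toNat]
    · right
      rw [pv_one_lt_count_iff]
      rcases lt_or_gt_of_ne (show i.toNat ≠ j.toNat by omega) with h | h
      · exact ⟨i.toNat, j.toNat, h, hj, rfl, hab.symm⟩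
      · exact ⟨j.toNat, i.toNat, h, hi, hab.symm, rfl⟩
    · exact Or.inl hab
  · rintro ⟨a, ha, b, hb, hcond, rfl⟩
    obtain ⟨i, hi, hia⟩ := List.mem_iff_getElem.mp ha
    obtain ⟨j, hj, hjb⟩ := List.mem_iff_getElem.mp hb
    rcases hcond with hab | hcnt
    · refine ⟨(i : Int), (j : Int), by omega, by omega, by omega, by omega, ?_, ?_⟩
      · intro h
        apply hab
        rw [← hia, ← hjb]
        congr 1
        omega
      · rw [show ((i : Int)) = ((i : Nat) : Int) from rfl, hget i hi,
            show ((j : Int)) = ((j : Nat) : Int) from rfl, hget j hj, hia, hjb]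
    · rw [pv_one_lt_count_iff] at hcnt
      obtain ⟨i', j', hij', hj', hi'a, hj'a⟩ := hcnt
      by_cases hab : a = b
      · have hi'lt : i' < (s.take (max n 0).toNat).length := Nat.lt_trans hij' hj'
        refine ⟨(i' : Int), (j' : Int), by omega, by omega, by omega, by omega, by omega, ?_⟩
        rw [hget i' hi'lt, hget j' hj', hi'a, hj'a, hab]
      · refine ⟨(i : Int), (j : Int), by omega, by omega, by omega, by omega, ?_, ?_⟩
        · intro h
          apply hab
          rw [← hia, ← hjb]
          congr 1
          omega
        · rw [hget i hi, hget j hj, hia, hjb]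

-- ===== VERDICT (by name: the statement is the Claim_ definition above) =====
theorem func_spec : Claim_equal_func := by
  intro n s _ hpre
  unfold Spec_func func func_alt
  have hpre' : n ≤ (s.length : Int) := hpre
  have hslice : PySem.List.slice s none (some (max n 0)) = s.take (max n 0).toNat :=
    PySem.List.slice_to s (by omega)
  simp only [hslice]
  have hperm := (List.perm_ext_iff_of_nodup (pv_nodupA n s) (pv_nodupB (s.take (max n 0).toNat))).mpr
    (fun x => by rw [pv_memA n s x, pv_memB _ x, pv_cond_iff n s hpre' x])
  rw [PySem.Set.len_eq, PySem.Set.len_eq, hperm.length_eq]
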